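-- pv_equiv track=rewrite | github.com/sungyeong98/leetcode | 2395-find-subarrays-with-equal-sum/2395-find-subarrays-with-equal-sum.py | findSubarrays
-- ===== SOURCE A (Python) =====
-- from typing import List
--
-- def findSubarrays(nums: List[int]) -> bool:
--     n=len(nums)
--     for i in range(n-2):
--         left=sum(nums[i:i+2])
--         for j in range(i+1,n-1):
--             right=sum(nums[j:j+2])
--             if left==right:
--                 return True
--     return False
-- ===== SOURCE B (Python) =====
-- def findSubarrays(nums):
--     seen = set()
--     for a, b in zip(nums, nums[1:]):
--         s = a + b
--         if s in seen:
--             return True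
--         seen.add(s)
--     return False
-- ===== Notes on version B (the rewrite author's own statement) =====
-- stated objective: faster
-- what changed: Replaced A's nested quadratic scan comparing every pair of adjacent-pair sums (each recomputed by slicing) with a single pass that stores each adjacent sum in a hash set and returns True on the first repeat.
import Mathlib
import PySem

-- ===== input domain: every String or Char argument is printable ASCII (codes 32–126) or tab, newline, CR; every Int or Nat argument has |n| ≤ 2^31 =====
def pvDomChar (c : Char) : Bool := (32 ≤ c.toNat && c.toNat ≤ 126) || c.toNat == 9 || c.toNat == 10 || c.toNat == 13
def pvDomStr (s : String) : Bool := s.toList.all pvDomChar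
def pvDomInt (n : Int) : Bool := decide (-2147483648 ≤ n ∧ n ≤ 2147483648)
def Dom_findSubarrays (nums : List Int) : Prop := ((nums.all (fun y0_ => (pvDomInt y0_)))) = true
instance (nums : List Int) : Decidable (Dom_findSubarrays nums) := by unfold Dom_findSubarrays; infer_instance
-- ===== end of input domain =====

-- B replaces A's quadratic double scan over pairs of adjacent-pair sums by one pass that
-- records each adjacent sum in a hash set and reports the first repeat (objective: faster).

-- ===== PORT A =====
def findSubarrays (nums : List Int) : Bool :=
  let n : Int := PySem.List.len nums
  (PySem.List.pyRange 0 (n - 2) 1).foldl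
    (fun acc i =>
      if (PySem.List.pyRange (i + 1) (n - 1) 1).foldl
           (fun acc2 j =>
             if (PySem.List.slice nums (some i) (some (i + 2))).sum ==
                (PySem.List.slice nums (some j) (some (j + 2))).sum
             then true else acc2)
           false
      then true else acc)
    false

-- ===== PORT B =====
def altLoop (seen : PySem.Set Int) : List (Int × Int) → Bool
  | [] => false
  | (a, b) :: rest =>
    let s := a + b
    if PySem.Set.contains seen s then true
    else altLoop (PySem.Set.add seen s) rest

def findSubarrays_alt (nums : List Int) : Bool :=
  altLoop PySem.Set.empty (nums.zip (PySem.List.slice nums (some 1) none))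

-- ===== PRECONDITION & SPEC =====
def Spec_findSubarrays (nums : List Int) (out : Bool) : Prop := out = findSubarrays_alt nums
instance (nums : List Int) (out : Bool) : Decidable (Spec_findSubarrays nums out) := by unfold Spec_findSubarrays; infer_instance

-- ===== CLAIM (what is proved, stated in full; the proofs are below) =====
def Claim_equal_findSubarrays : Prop := ∀ (nums : List Int), Dom_findSubarrays nums → Spec_findSubarrays nums (findSubarrays nums)

-- ===== LEMMAS AND PROOFS =====

-- the list of adjacent-pair sums
def adjSums (nums : List Int) : List Int := (nums.zip nums.tail).map (fun p => p.1 + p.2)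

theorem length_adjSums (nums : List Int) : (adjSums nums).length = nums.length - 1 := by
  simp [adjSums, List.length_zip, List.length_tail]

theorem getElem_adjSums (nums : List Int) (k : Nat) (hk : k < (adjSums nums).length) :
    (adjSums nums)[k] =
      nums[k]'(by rw [length_adjSums] at hk; omega) +
      nums[k+1]'(by rw [length_adjSums] at hk; omega) := by
  have hk' := hk
  rw [length_adjSums] at hk'
  simp [adjSums, List.getElem_zip, List.getElem_tail]

-- B-side characterisation: the seen-set loop detects a repeat among seen ++ sums
theorem altLoop_eq (ps : List (Int × Int)) (seen : List Int) (hseen : seen.Nodup) :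
    altLoop seen ps = !decide (seen ++ ps.map (fun p => p.1 + p.2)).Nodup := by
  induction ps generalizing seen with
  | nil => simp [altLoop, hseen]
  | cons hd tl ih =>
    obtain ⟨a, b⟩ := hd
    by_cases hmem : (a + b) ∈ seen
    · have hdup : ¬ (seen ++ (a + b) :: tl.map (fun p => p.1 + p.2)).Nodup := by
        intro hnd
        have := (List.nodup_append.mp hnd).2.2
        exact this (a + b) hmem (a + b) (by simp) rfl
      simp [altLoop, PySem.Set.contains, hmem, hdup]
    · have hcon : PySem.Set.contains seen (a + b) = false := by
        simp [PySem.Set.contains, hmem]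
      have hadd : PySem.Set.add seen (a + b) = seen ++ [a + b] := by
        simp [PySem.Set.add, PySem.Set.contains, hmem]
      have hnd : (seen ++ [a + b]).Nodup := by
        rw [List.nodup_append]
        refine ⟨hseen, List.nodup_singleton _, ?_⟩
        intro x hx y hy hxy
        have hy' : y = a + b := by simpa using hy
        exact hmem (hy' ▸ hxy ▸ hx)
      have := ih (seen ++ [a + b]) hnd
      simp only [altLoop, hcon, Bool.false_eq_true, if_false, hadd, this]
      congr 2
      simp

theorem alt_iff (nums : List Int) :
    findSubarrays_alt nums = true ↔ ¬ (adjSums nums).Nodup := by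
  rw [findSubarrays_alt, PySem.List.slice_from_one,
      altLoop_eq _ PySem.Set.empty (by simp [PySem.Set.empty])]
  simp [PySem.Set.empty, adjSums]

-- slice sum: sum(nums[k:k+2]) for 0 ≤ k < len-1 is nums[k] + nums[k+1]
theorem slice_sum_eq (nums : List Int) (k : Nat) (hk : k + 1 < nums.length) :
    (PySem.List.slice nums (some (k : Int)) (some ((k : Int) + 2))).sum =
      nums[k] + nums[k+1] := by
  have h2 : ((k : Int) + 2) = ((k + 2 : Nat) : Int) := by push_cast; ring
  rw [h2, PySem.List.slice_natCast]
  have hd : nums.drop k = nums[k] :: nums.drop (k + 1) := List.drop_eq_getElem_cons (by omega)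
  have hd2 : nums.drop (k + 1) = nums[k+1] :: nums.drop (k + 2) := List.drop_eq_getElem_cons (by omega)
  rw [hd, hd2]
  have hkk : k + 2 - k = 2 := by omega
  have ht : ∀ (x y : Int) (r : List Int), List.take 2 (x :: y :: r) = [x, y] := fun _ _ _ => rfl
  rw [hkk, ht]
  simp

-- A-side characterisation
theorem a_iff (nums : List Int) :
    findSubarrays nums = true ↔
      ∃ i j : Nat, i < j ∧ j < (adjSums nums).length ∧ (adjSums nums)[i]? = (adjSums nums)[j]? := by
  simp only [findSubarrays]
  rw [PySem.List.foldl_if_true_eq (p := fun i =>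
        List.foldl (fun acc2 j =>
          if ((PySem.List.slice nums (some i) (some (i + 2))).sum ==
              (PySem.List.slice nums (some j) (some (j + 2))).sum)
          then true else acc2) false (PySem.List.pyRange (i + 1) (PySem.List.len nums - 1) 1))]
  simp only [Bool.false_or, List.any_eq_true, PySem.List.foldl_if_true_eq, PySem.List.len_eq]
  constructor
  · rintro ⟨i, hi, hinner⟩
    obtain ⟨j, hj, heq⟩ := hinner
    rw [PySem.List.mem_pyRange_one] at hi hj
    have hi0 : 0 ≤ i := hi.1
    have hj0 : 0 ≤ j := by omega
    obtain ⟨ni, rfl⟩ : ∃ n : Nat, i = (n : Int) := ⟨i.toNat, (Int.toNat_of_nonneg hi0).symm⟩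
    obtain ⟨nj, rfl⟩ : ∃ n : Nat, j = (n : Int) := ⟨j.toNat, (Int.toNat_of_nonneg hj0).symm⟩
    have hni : ni + 1 < nums.length := by omega
    have hnj : nj + 1 < nums.length := by omega
    have hlt : ni < nj := by exact_mod_cast (by omega : (ni : Int) < nj)
    refine ⟨ni, nj, hlt, by rw [length_adjSums]; omega, ?_⟩
    rw [slice_sum_eq nums ni hni, slice_sum_eq nums nj hnj] at heq
    have hval : nums[ni] + nums[ni+1] = nums[nj] + nums[nj+1] := by
      have := of_decide_eq_true heq
      omega
    rw [List.getElem?_eq_getElem (by rw [length_adjSums]; omega),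
        List.getElem?_eq_getElem (by rw [length_adjSums]; omega),
        getElem_adjSums, getElem_adjSums, hval]
  · rintro ⟨ni, nj, hlt, hjlen, heq⟩
    rw [length_adjSums] at hjlen
    refine ⟨(ni : Int), ?_, ?_⟩
    · rw [PySem.List.mem_pyRange_one]; constructor
      · exact Int.natCast_nonneg ni
      · omega
    · refine ⟨(nj : Int), ?_, ?_⟩
      · rw [PySem.List.mem_pyRange_one]; constructor <;> omega
      · rw [List.getElem?_eq_getElem (by rw [length_adjSums]; omega),
            List.getElem?_eq_getElem (by rw [length_adjSums]; omega),
            getElem_adjSums, getElem_adjSums] at heq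
        have hval : nums[ni]'(by omega) + nums[ni+1]'(by omega)
                  = nums[nj]'(by omega) + nums[nj+1]'(by omega) := by
          injection heq
        rw [slice_sum_eq nums ni (by omega), slice_sum_eq nums nj (by omega)]
        simp [hval]

theorem not_nodup_iff (l : List Int) :
    ¬ l.Nodup ↔ ∃ i j : Nat, i < j ∧ j < l.length ∧ l[i]? = l[j]? := by
  rw [List.nodup_iff_getElem?_ne_getElem?]
  push Not
  constructor
  · rintro ⟨i, j, h1, h2, h3⟩; exact ⟨i, j, h1, h2, h3⟩
  · rintro ⟨i, j, h1, h2, h3⟩; exact ⟨i, j, h1, h2, h3⟩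

-- ===== VERDICT (by name: the statement is the Claim_ definition above) =====
theorem findSubarrays_spec : Claim_equal_findSubarrays := by
  intro nums _
  unfold Spec_findSubarrays
  have hA := a_iff nums
  have hB := alt_iff nums
  rw [not_nodup_iff] at hB
  exact Bool.eq_iff_iff.mpr (hA.trans hB.symm)
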